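-- pv_equiv track=rewrite | github.com/insignificance/LocalizationWorkbench | build/Build/Products/Release/LocalizationWorkbench.app/Contents/Resources/Python/check_excel_newlines.py | find_key_column
-- ===== SOURCE A (Python) =====
-- KEY_HEADERS = {"Dev Key", "文案的key"}
--
-- def col_to_index(col: str) -> int:
--     idx = 0
--     for ch in col:
--         if ch.isalpha():
--             idx = idx * 26 + (ord(ch.upper()) - 64)
--     return idx - 1
--
-- def find_key_column(header_row: dict[str, str], english_col: str) -> str:
--     left_side = sorted(
--         (col for col in header_row if col_to_index(col) < col_to_index(english_col)),
--         key=col_to_index,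
--     )
--     for col in left_side:
--         if header_row[col] in KEY_HEADERS:
--             return col
--     return left_side[0] if left_side else "A"
-- ===== SOURCE B (Python) =====
-- KEY_HEADERS = {"Dev Key", "文案的key"}
--
-- def _col_index(col: str) -> int:
--     v = 0
--     for ch in filter(str.isalpha, col):
--         v = v * 26 + ord(ch.upper()) - 64
--     return v - 1
--
-- def find_key_column(header_row: dict[str, str], english_col: str) -> str:
--     e = _col_index(english_col)
--     best = None       # (index, col) with minimal index among all columns left of english_col
--     best_key = None   # same, restricted to columns whose header is a key header
--     for col, val in header_row.items():
--         i = _col_index(col)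
--         if i < e:
--             if best is None or i < best[0]:
--                 best = (i, col)
--             if val in KEY_HEADERS and (best_key is None or i < best_key[0]):
--                 best_key = (i, col)
--     if best_key is not None:
--         return best_key[1]
--     return best[1] if best is not None else "A"
-- ===== Notes on version B (the rewrite author's own statement) =====
-- stated objective: faster
-- what changed: A sorts the left-side columns (recomputing col_to_index of english_col per column) and then scans for the first key-header column; B makes a single pass over the dict items tracking the minimal-index column overall and the minimal-index key-header column, with first-occurrence tie-breaking matching A's stable sort.
import Mathlib
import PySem

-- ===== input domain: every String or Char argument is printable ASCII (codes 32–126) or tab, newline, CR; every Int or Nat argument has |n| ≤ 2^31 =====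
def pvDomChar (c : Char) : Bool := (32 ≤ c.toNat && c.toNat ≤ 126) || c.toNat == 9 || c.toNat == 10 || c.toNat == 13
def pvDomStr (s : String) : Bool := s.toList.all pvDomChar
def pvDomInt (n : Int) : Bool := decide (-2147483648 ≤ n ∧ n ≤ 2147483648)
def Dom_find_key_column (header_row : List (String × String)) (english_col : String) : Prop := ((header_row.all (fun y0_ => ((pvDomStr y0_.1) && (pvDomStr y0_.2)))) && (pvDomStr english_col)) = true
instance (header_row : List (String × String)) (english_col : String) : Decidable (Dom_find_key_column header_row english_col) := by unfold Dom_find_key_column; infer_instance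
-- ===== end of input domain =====

-- B replaces A's "sort the left-side columns, then scan" by a single pass keeping the minimal-index
-- column overall and the minimal-index column with a key header (first occurrence wins ties, like the
-- stable sort); one structurally different pass instead of sort-then-scan.
-- The dict argument is modelled as an association list and normalised through PySem.Dict (Python dict semantics).

-- module constant shared by both versions: KEY_HEADERS = {"Dev Key", "文案的key"}
def KEY_HEADERS : PySem.Set String := ["Dev Key", "文案的key"]

-- ===== PORT A =====
def col_to_index (col : String) : Int :=
  (col.toList.foldl
    (fun idx ch =>
      if PySem.Chars.isalpha ch then idx * 26 + (((PySem.Chars.upperChar ch).toNat : Int) - 64)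
      else idx)
    0) - 1

def find_key_column (header_row : List (String × String)) (english_col : String) : String :=
  let d := PySem.Dict.ofList header_row
  let left_side := PySem.List.sorted
    ((d.keys).filter (fun col => decide (col_to_index col < col_to_index english_col)))
    col_to_index
  -- header_row[col]: col is a key of d, so the lookup always succeeds; "" default is unreachable
  match left_side.find? (fun col => KEY_HEADERS.contains (d.getD col "")) with
  | some col => col
  | none => match left_side with
    | [] => "A"
    | c :: _ => c

-- ===== PORT B =====
def col_index_alt (col : String) : Int :=
  ((col.toList.filter PySem.Chars.isalpha).foldl
    (fun v ch => v * 26 + ((PySem.Chars.upperChar ch).toNat : Int) - 64) 0) - 1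

def upd_min (b : Option (Int × String)) (i : Int) (c : String) : Option (Int × String) :=
  match b with
  | none => some (i, c)
  | some q => if i < q.1 then some (i, c) else some q

def step_alt (e : Int) (st : Option (Int × String) × Option (Int × String))
    (p : String × String) : Option (Int × String) × Option (Int × String) :=
  let i := col_index_alt p.1
  if i < e then
    (upd_min st.1 i p.1, if KEY_HEADERS.contains p.2 then upd_min st.2 i p.1 else st.2)
  else st

def find_key_column_alt (header_row : List (String × String)) (english_col : String) : String :=
  let d := PySem.Dict.ofList header_row
  let e := col_index_alt english_col
  let r := d.items.foldl (step_alt e) (none, none)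
  match r.2 with
  | some q => q.2
  | none => match r.1 with
    | some q => q.2
    | none => "A"

-- ===== PRECONDITION & SPEC =====
def Spec_find_key_column (header_row : List (String × String)) (english_col : String) (out : String) : Prop := out = find_key_column_alt header_row english_col
instance (header_row : List (String × String)) (english_col : String) (out : String) : Decidable (Spec_find_key_column header_row english_col out) := by unfold Spec_find_key_column; infer_instance

-- ===== CLAIM (what is proved, stated in full; the proofs are below) =====
def Claim_equal_find_key_column : Prop := ∀ (header_row : List (String × String)) (english_col : String), Dom_find_key_column header_row english_col → Spec_find_key_column header_row english_col (find_key_column header_row english_col)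

-- ===== LEMMAS AND PROOFS =====

-- the two index functions agree
theorem idx_eq (col : String) : col_index_alt col = col_to_index col := by
  unfold col_index_alt col_to_index
  rw [List.foldl_filter]
  have h : (fun (v : Int) (ch : Char) =>
      if PySem.Chars.isalpha ch then v * 26 + ((PySem.Chars.upperChar ch).toNat : Int) - 64 else v)
    = (fun (idx : Int) (ch : Char) =>
      if PySem.Chars.isalpha ch then idx * 26 + (((PySem.Chars.upperChar ch).toNat : Int) - 64) else idx) := by
    funext v ch
    by_cases hc : PySem.Chars.isalpha ch
    · simp [hc]; ring
    · simp [hc]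
  rw [h]

-- short names used by the proof
def kord : String → Int := col_to_index

def insK (x : String) (acc : List String) : List String :=
  PySem.List.insertBy (fun a b => decide (kord a < kord b)) x acc

def upd1 (o : Option String) (x : String) : Option String :=
  match o with
  | none => some x
  | some b => if kord x < kord b then some x else some b

def runMin (l : List String) (o : Option String) : Option String := l.foldl upd1 o

def enc (c : String) : Int × String := (kord c, c)

theorem head?_insertBy (x : String) (acc : List String) :
    (insK x acc).head? = some ((upd1 acc.head? x).getD x) := by
  cases acc with
  | nil => simp [insK, PySem.List.insertBy, upd1]
  | cons y ys =>
    simp only [insK, PySem.List.insertBy, upd1]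
    by_cases hlt : kord x < kord y
    · simp [hlt]
    · simp [hlt]

theorem head?_foldl_insK (l : List String) (acc : List String) :
    (l.foldl (fun a x => insK x a) acc).head? = runMin l acc.head? := by
  induction l generalizing acc with
  | nil => simp [runMin]
  | cons x t ih =>
    rw [List.foldl_cons]
    rw [ih]
    simp only [runMin, List.foldl_cons]
    congr 1
    rw [head?_insertBy]
    cases h : acc.head? with
    | none => simp [upd1]
    | some b => simp only [upd1]; split <;> simp

theorem head?_sorted (l : List String) :
    (PySem.List.sorted l kord).head? = runMin l none := by
  rw [PySem.List.sorted_eq_foldl_insertBy]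
  have := head?_foldl_insK l []
  simpa [insK] using this

theorem mem_le_of_pairwise {y : String} {ys : List String} {z : String}
    (h : (y :: ys).Pairwise (fun a b => kord a ≤ kord b)) (hz : z ∈ y :: ys) :
    kord y ≤ kord z := by
  rcases List.mem_cons.mp hz with rfl | hz
  · exact le_refl _
  · exact (List.pairwise_cons.mp h).1 z hz

theorem insertBy_front {x : String} {acc : List String}
    (h : ∀ z ∈ acc, kord x < kord z) : insK x acc = x :: acc := by
  cases acc with
  | nil => simp [insK, PySem.List.insertBy]
  | cons y ys =>
    simp only [insK, PySem.List.insertBy]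
    rw [if_pos]
    simp [h y (by simp)]

theorem pairwise_insertBy (x : String) (acc : List String)
    (h : acc.Pairwise (fun a b => kord a ≤ kord b)) :
    (insK x acc).Pairwise (fun a b => kord a ≤ kord b) := by
  induction acc with
  | nil => simp [insK, PySem.List.insertBy]
  | cons y ys ih =>
    simp only [insK, PySem.List.insertBy]
    split
    · rename_i hlt
      refine List.pairwise_cons.mpr ⟨?_, h⟩
      intro z hz
      exact le_trans (le_of_lt (by simpa using hlt)) (mem_le_of_pairwise h hz)
    · rename_i hge
      refine List.pairwise_cons.mpr ⟨?_, ih (List.pairwise_cons.mp h).2⟩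
      intro z hz
      rcases (PySem.List.mem_insertBy _ _ _ _).mp (by simpa [insK] using hz) with rfl | hz'
      · exact le_of_not_gt (by simpa using hge)
      · exact (List.pairwise_cons.mp h).1 z hz'

theorem filter_insertBy (P : String → Bool) (x : String) (acc : List String)
    (h : acc.Pairwise (fun a b => kord a ≤ kord b)) :
    (insK x acc).filter P = if P x then insK x (acc.filter P) else acc.filter P := by
  induction acc with
  | nil => cases hx : P x <;> simp [insK, PySem.List.insertBy, hx]
  | cons y ys ih =>
    have hys := (List.pairwise_cons.mp h).2
    have hcase : insK x (y :: ys) =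
        if decide (kord x < kord y) = true then x :: y :: ys else y :: insK x ys := by
      simp only [insK, PySem.List.insertBy]
    rw [hcase]
    split
    · rename_i hlt
      have hfront : insK x ((y :: ys).filter P) = x :: (y :: ys).filter P := by
        apply insertBy_front
        intro z hz
        exact lt_of_lt_of_le (by simpa using hlt)
          (mem_le_of_pairwise h (List.mem_of_mem_filter hz))
      cases hx : P x with
      | false => simp [List.filter_cons, hx]
      | true =>
        simp only [List.filter_cons] at hfront ⊢
        simp [hx, hfront]
    · rename_i hge
      have hstep : ∀ l, insK x (y :: l) = y :: insK x l := by
        intro l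
        simp only [insK, PySem.List.insertBy]
        rw [if_neg hge]
      cases hx : P x <;> cases hy : P y <;>
        simp [hx, hy, ih hys, hstep]

theorem filter_foldl_insK (P : String → Bool) (l : List String) (acc : List String)
    (h : acc.Pairwise (fun a b => kord a ≤ kord b)) :
    (l.foldl (fun a x => insK x a) acc).filter P
      = (l.filter P).foldl (fun a x => insK x a) (acc.filter P) := by
  induction l generalizing acc with
  | nil => simp
  | cons x t ih =>
    rw [List.foldl_cons, ih (insK x acc) (pairwise_insertBy x acc h)]
    rw [filter_insertBy P x acc h]
    cases hx : P x <;> simp [hx]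

theorem filter_sorted (P : String → Bool) (l : List String) :
    (PySem.List.sorted l kord).filter P = PySem.List.sorted (l.filter P) kord := by
  rw [PySem.List.sorted_eq_foldl_insertBy, PySem.List.sorted_eq_foldl_insertBy]
  have := filter_foldl_insK P l [] (by simp)
  simpa [insK] using this

-- B's fold splits into two independent min-folds over the two filtered lists
theorem foldl_step_alt (e : Int) (l : List (String × String))
    (st : Option (Int × String) × Option (Int × String)) :
    l.foldl (step_alt e) st
      = ((l.filter (fun p => decide (col_index_alt p.1 < e))).foldl
            (fun b p => upd_min b (col_index_alt p.1) p.1) st.1,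
         (l.filter (fun p => decide (col_index_alt p.1 < e) && KEY_HEADERS.contains p.2)).foldl
            (fun b p => upd_min b (col_index_alt p.1) p.1) st.2) := by
  induction l generalizing st with
  | nil => simp
  | cons p t ih =>
    rw [List.foldl_cons, ih]
    by_cases he : col_index_alt p.1 < e <;> by_cases hk : p.2 ∈ KEY_HEADERS <;>
      simp [step_alt, he, hk]

-- a pair min-fold is the string min-fold with the index cached alongside
theorem foldl_upd_min_enc (l : List (String × String)) (o : Option String) :
    l.foldl (fun b p => upd_min b (col_index_alt p.1) p.1) (o.map enc)
      = (runMin (l.map (·.1)) o).map enc := by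
  induction l generalizing o with
  | nil => simp [runMin]
  | cons p t ih =>
    rw [List.foldl_cons]
    have hstep : upd_min (o.map enc) (col_index_alt p.1) p.1 = (upd1 o p.1).map enc := by
      cases o with
      | none => simp [upd_min, upd1, enc, idx_eq, kord]
      | some b =>
        simp only [upd_min, upd1, Option.map_some, enc, idx_eq, kord]
        split <;> simp [enc, kord]
    rw [hstep, ih (upd1 o p.1)]
    simp [runMin]

-- ===== VERDICT (by name: the statement is the Claim_ definition above) =====
theorem find_key_column_spec : Claim_equal_find_key_column := by
  intro header_row english_col _
  unfold Spec_find_key_column find_key_column find_key_column_alt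
  simp only []
  set d := PySem.Dict.ofList header_row with hd
  have hnd : d.keys.Nodup := PySem.Dict.nodup_keys_ofList header_row
  have hkeys : d.keys = d.items.map (·.1) := rfl
  -- rewrite B
  rw [foldl_step_alt]
  simp only [idx_eq]
  set e := col_to_index english_col with he
  set L := d.items.filter (fun p => decide (col_to_index p.1 < e)) with hL
  set M := d.items.filter (fun p => decide (col_to_index p.1 < e) && KEY_HEADERS.contains p.2) with hM
  have hBL := foldl_upd_min_enc L none
  have hBM := foldl_upd_min_enc M none
  simp only [idx_eq, Option.map_none] at hBL hBM
  rw [hBL, hBM]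
  -- rewrite A
  have hleft : (d.keys).filter (fun col => decide (col_to_index col < col_to_index english_col))
      = L.map (·.1) := by
    rw [hkeys, List.filter_map]
    rfl
  rw [hleft]
  have hgetD : ∀ p ∈ L, p ∈ d.items := by
    intro p hp; exact List.mem_of_mem_filter hp
  have hPfilter : (L.map (·.1)).filter (fun col => KEY_HEADERS.contains (d.getD col ""))
      = M.map (·.1) := by
    rw [List.filter_map]
    have : L.filter ((fun col => KEY_HEADERS.contains (d.getD col "")) ∘ (·.1))
        = L.filter (fun p => KEY_HEADERS.contains p.2) := by
      apply List.filter_congr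
      intro p hp
      have := PySem.Dict.getD_of_mem_items d (hgetD p hp) hnd ""
      simp [Function.comp, this]
    rw [this, hL, List.filter_filter, hM]
    have hcomm : (fun a : String × String => KEY_HEADERS.contains a.2 && decide (col_to_index a.1 < e))
        = (fun p : String × String => decide (col_to_index p.1 < e) && KEY_HEADERS.contains p.2) := by
      funext p
      rw [Bool.and_comm]
    rw [hcomm]
  have hfind : (PySem.List.sorted (L.map (·.1)) col_to_index).find?
      (fun col => KEY_HEADERS.contains (d.getD col ""))
      = runMin (M.map (·.1)) none := by
    rw [← List.head?_filter]
    have hfs := filter_sorted (fun col => KEY_HEADERS.contains (d.getD col "")) (L.map (·.1))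
    simp only [kord] at hfs
    rw [hfs, hPfilter]
    have := head?_sorted (M.map (·.1))
    simpa [kord] using this
  rw [hfind]
  have hhead := head?_sorted (L.map (·.1))
  simp only [kord] at hhead
  cases hm : runMin (M.map (·.1)) none with
  | some c => simp [enc]
  | none =>
    simp only [Option.map_none]
    cases hl : runMin (L.map (·.1)) none with
    | none =>
      have : (PySem.List.sorted (L.map (·.1)) col_to_index).head? = none := by rw [hhead, hl]
      rw [List.head?_eq_none_iff] at this
      simp [this]
    | some c =>
      have : (PySem.List.sorted (L.map (·.1)) col_to_index).head? = some c := by rw [hhead, hl]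
      cases hs : PySem.List.sorted (L.map (·.1)) col_to_index with
      | nil => rw [hs] at this; simp at this
      | cons a t => rw [hs] at this; simp at this; simp [this, enc]
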